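-- pv_equiv track=rewrite | github.com/sayedRaheel/rlm-memory | memory_rlm.py | _split_into_sessions
-- ===== SOURCE A (Python) =====
-- from typing import Optional, Dict, Any, List
--
-- def _split_into_sessions(history_turns: List[Dict]) -> tuple:
--     """
--     Split flat history_turns into per-session text chunks and date labels.
--
--     A new session starts whenever a 'system' turn contains '--- Session'.
--     If no session markers exist, each 50-turn block becomes one session.
--
--     Returns:
--         sessions_text  : list[str]  — full text of each session
--         session_dates  : list[str]  — date/label for each session
--     """
--     sessions_text: List[str] = []
--     session_dates: List[str] = []
--     current_lines: List[str] = []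
--     current_date: str = ""
--
--     for turn in history_turns:
--         content = turn.get("content", "")
--         role    = turn.get("role", "user")
--
--         # Session boundary marker injected by real_longmemeval.py / build_memory_store()
--         if role == "system" and "--- Session" in content:
--             if current_lines:
--                 sessions_text.append("\n".join(current_lines))
--                 session_dates.append(current_date)
--             current_lines = []
--             # Extract date from marker: [--- Session N | DATE ---]
--             try:
--                 current_date = content.split("|")[1].strip().rstrip("-").strip()
--             except Exception:
--                 current_date = content
--         else:
--             current_lines.append(f"[{role.upper()}]: {content}")
--
--     # Flush last session
--     if current_lines:
--         sessions_text.append("\n".join(current_lines))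
--         session_dates.append(current_date)
--
--     # Fallback: if no session markers, chunk into blocks of 50 turns
--     if not sessions_text:
--         chunk_size = 50
--         all_lines = [
--             f"[{t.get('role','user').upper()}]: {t.get('content','')}"
--             for t in history_turns
--         ]
--         sessions_text = [
--             "\n".join(all_lines[i:i+chunk_size])
--             for i in range(0, len(all_lines), chunk_size)
--         ]
--         session_dates = [f"Block {i+1}" for i in range(len(sessions_text))]
--
--     return sessions_text, session_dates
-- ===== SOURCE B (Python) =====
-- from typing import List, Dict
--
-- def _split_into_sessions(history_turns: List[Dict]) -> tuple:
--     """Index the session markers, then slice history_turns into segments."""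
--
--     def is_marker(t):
--         return t.get("role", "user") == "system" and "--- Session" in t.get("content", "")
--
--     def line(t):
--         return f"[{t.get('role','user').upper()}]: {t.get('content','')}"
--
--     def date_of(content):
--         parts = content.split("|")
--         if len(parts) < 2:
--             return content
--         return parts[1].strip().rstrip("-").strip()
--
--     texts, dates = [], []
--     rest, date = history_turns, ""
--     while True:
--         k = next((i for i, t in enumerate(rest) if is_marker(t)), None)
--         seg = rest if k is None else rest[:k]
--         if seg:
--             texts.append("\n".join(map(line, seg)))
--             dates.append(date)
--         if k is None:
--             break
--         date = date_of(rest[k].get("content", ""))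
--         rest = rest[k + 1:]
--
--     if not texts:
--         texts = ["\n".join(map(line, history_turns[i:i + 50]))
--                  for i in range(0, len(history_turns), 50)]
--         dates = [f"Block {i + 1}" for i in range(len(texts))]
--     return texts, dates
-- ===== Notes on version B (the rewrite author's own statement) =====
-- stated objective: alternative
-- what changed: B replaces A's single stateful per-turn loop (accumulating current_lines/current_date and flushing at each marker) by an index-and-slice decomposition: it repeatedly locates the next session-marker index, slices the segment before it off the list, and builds each session's text from that slice; the 50-turn fallback is kept.
import Mathlib
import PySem

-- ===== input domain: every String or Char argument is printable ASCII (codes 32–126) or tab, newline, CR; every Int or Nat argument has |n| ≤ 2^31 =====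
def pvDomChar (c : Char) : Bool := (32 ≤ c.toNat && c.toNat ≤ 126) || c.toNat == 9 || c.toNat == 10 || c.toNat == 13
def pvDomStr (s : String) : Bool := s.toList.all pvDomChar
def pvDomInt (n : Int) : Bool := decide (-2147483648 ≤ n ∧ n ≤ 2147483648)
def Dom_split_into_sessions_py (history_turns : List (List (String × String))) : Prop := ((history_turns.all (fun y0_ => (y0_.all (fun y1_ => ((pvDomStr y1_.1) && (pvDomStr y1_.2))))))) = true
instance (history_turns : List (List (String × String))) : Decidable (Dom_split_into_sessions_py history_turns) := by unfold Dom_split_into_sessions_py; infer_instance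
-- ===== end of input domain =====

-- B replaces A's per-turn accumulator loop by indexing the next session marker and slicing
-- the history into segments (objective: alternative decomposition, same cost).

-- ===== PORT A =====
-- turn.get(key, default) on the association-list dict
def pvA_get (turn : List (String × String)) (k dflt : String) : String :=
  PySem.Dict.getD (PySem.Dict.mk turn) k dflt

-- hand port of str.rstrip("-") (PySem has no chars-argument rstrip): drops exactly the
-- trailing '-' characters, as Python does for this single-char argument
def pvA_rstripDash (cs : List Char) : List Char :=
  (cs.reverse.dropWhile (fun c => c == '-')).reverse

-- content.split("|")[1].strip().rstrip("-").strip(); the try/except catches exactly the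
-- IndexError of [1] (pyGet? = none) and yields content
def pvA_date (content : String) : String :=
  match PySem.List.pyGet? (PySem.Chars.splitOn content.toList ['|']) 1 with
  | some p => String.ofList (PySem.Chars.strip (pvA_rstripDash (PySem.Chars.strip p)))
  | none => content

def pvA_line (role content : String) : String :=
  "[" ++ PySem.Str.upper role ++ "]: " ++ content

-- the 'if current_lines: append(...)' flush A performs at a marker and after the loop
def pvFlush (st : List String × List String × List String × String) :
    List String × List String :=
  if st.2.2.1 ≠ [] then (st.1 ++ [PySem.Str.join "\n" st.2.2.1], st.2.1 ++ [st.2.2.2])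
  else (st.1, st.2.1)

-- one iteration of A's for-loop; state = (sessions_text, session_dates, current_lines, current_date)
def pvA_step (st : List String × List String × List String × String)
    (turn : List (String × String)) : List String × List String × List String × String :=
  let content := pvA_get turn "content" ""
  let role := pvA_get turn "role" "user"
  if role == "system" && PySem.Str.isIn "--- Session" content then
    ((pvFlush st).1, (pvFlush st).2, [], pvA_date content)
  else
    (st.1, st.2.1, st.2.2.1 ++ [pvA_line role content], st.2.2.2)

def split_into_sessions_py (history_turns : List (List (String × String))) :
    List String × List String :=
  let res := pvFlush (history_turns.foldl pvA_step ([], [], [], ""))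
  if res.1 = [] then
    let all_lines := history_turns.map
      (fun t => pvA_line (pvA_get t "role" "user") (pvA_get t "content" ""))
    let texts := (PySem.List.pyRange 0 (all_lines.length : Int) 50).map
      (fun i => PySem.Str.join "\n" (PySem.List.slice all_lines (some i) (some (i + 50))))
    let dates := (PySem.List.pyRange 0 (texts.length : Int) 1).map
      (fun i => "Block " ++ PySem.Int.toStr (i + 1))
    (texts, dates)
  else res

-- ===== PORT B =====
def pvB_get (turn : List (String × String)) (k dflt : String) : String :=
  PySem.Dict.getD (PySem.Dict.mk turn) k dflt

def pvB_isMarker (t : List (String × String)) : Bool :=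
  (pvB_get t "role" "user" == "system") && PySem.Str.isIn "--- Session" (pvB_get t "content" "")

def pvB_line (t : List (String × String)) : String :=
  "[" ++ PySem.Str.upper (pvB_get t "role" "user") ++ "]: " ++ pvB_get t "content" ""

-- hand port of str.rstrip("-"), as on the A side
def pvB_rstripDash (cs : List Char) : List Char :=
  (cs.reverse.dropWhile (fun c => c == '-')).reverse

def pvB_date (content : String) : String :=
  let parts := PySem.Chars.splitOn content.toList ['|']
  if parts.length < 2 then content
  else String.ofList (PySem.Chars.strip (pvB_rstripDash (PySem.Chars.strip (parts.getD 1 []))))  -- parts[1]: in range here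

-- Source B's while loop: find the next marker index k, slice off rest[:k], continue on rest[k+1:]
-- (rest[:k] = take k and rest[k+1:] = drop (k+1): both bounds are nonnegative)
def pvB_loop (rest : List (List (String × String))) (date : String) :
    List String × List String :=
  match h : rest.findIdx? pvB_isMarker with
  | none =>
    if rest ≠ [] then ([PySem.Str.join "\n" (rest.map pvB_line)], [date]) else ([], [])
  | some k =>
    let seg := rest.take k
    let tail := pvB_loop (rest.drop (k + 1)) (pvB_date (pvB_get (rest.getD k []) "content" ""))
    if seg ≠ [] then (PySem.Str.join "\n" (seg.map pvB_line) :: tail.1, date :: tail.2)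
    else tail
termination_by rest.length
decreasing_by
  obtain ⟨hk, -⟩ := List.findIdx?_eq_some_iff_getElem.mp h
  simp only [List.length_drop]; omega

def split_into_sessions_py_alt (history_turns : List (List (String × String))) :
    List String × List String :=
  let res := pvB_loop history_turns ""
  if res.1 = [] then
    let texts := (PySem.List.pyRange 0 (history_turns.length : Int) 50).map
      (fun i => PySem.Str.join "\n"
        ((PySem.List.slice history_turns (some i) (some (i + 50))).map pvB_line))
    let dates := (PySem.List.pyRange 0 (texts.length : Int) 1).map
      (fun i => "Block " ++ PySem.Int.toStr (i + 1))
    (texts, dates)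
  else res

-- ===== PRECONDITION & SPEC =====
def Spec_split_into_sessions_py (history_turns : List (List (String × String))) (out : List String × List String) : Prop := out = split_into_sessions_py_alt history_turns
instance (history_turns : List (List (String × String))) (out : List String × List String) : Decidable (Spec_split_into_sessions_py history_turns out) := by unfold Spec_split_into_sessions_py; infer_instance

-- ===== CLAIM (what is proved, stated in full; the proofs are below) =====
def Claim_equal_split_into_sessions_py : Prop := ∀ (history_turns : List (List (String × String))), Dom_split_into_sessions_py history_turns → Spec_split_into_sessions_py history_turns (split_into_sessions_py history_turns)

-- ===== LEMMAS AND PROOFS =====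

-- A's date extraction equals B's length-test formulation
lemma pv_date_eq (c : String) : pvA_date c = pvB_date c := by
  unfold pvA_date pvB_date
  rcases hps : PySem.Chars.splitOn c.toList ['|'] with _ | ⟨p0, _ | ⟨p1, ps⟩⟩ <;>
    simp [PySem.List.pyGet?, PySem.List.pyIdx?, pvA_rstripDash, pvB_rstripDash]

-- structural reformulation of B's segment splitter, used to bridge to A's fold
def pvGl : List (List (String × String)) → List String → String → List String × List String
  | [], cur, d => if cur ≠ [] then ([PySem.Str.join "\n" cur], [d]) else ([], [])
  | t :: rest, cur, d =>
    if pvB_isMarker t then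
      let tail := pvGl rest [] (pvB_date (pvB_get t "content" ""))
      if cur ≠ [] then (PySem.Str.join "\n" cur :: tail.1, d :: tail.2) else tail
    else pvGl rest (cur ++ [pvB_line t]) d

lemma pv_fold_eq (rest : List (List (String × String))) :
    ∀ (ts ds cur : List String) (d : String),
      pvFlush (rest.foldl pvA_step (ts, ds, cur, d))
        = (ts ++ (pvGl rest cur d).1, ds ++ (pvGl rest cur d).2) := by
  induction rest with
  | nil =>
    intro ts ds cur d
    by_cases hc : cur = [] <;> simp [pvFlush, pvGl, hc]
  | cons t rest ih =>
    intro ts ds cur d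
    rw [List.foldl_cons]
    have hmarker : (pvA_get t "role" "user" == "system"
        && PySem.Str.isIn "--- Session" (pvA_get t "content" "")) = pvB_isMarker t := rfl
    by_cases hm : pvB_isMarker t = true
    · have hstep : pvA_step (ts, ds, cur, d) t
          = ((pvFlush (ts, ds, cur, d)).1, (pvFlush (ts, ds, cur, d)).2, [],
             pvA_date (pvA_get t "content" "")) := by
        simp only [pvA_step, hmarker, hm]; simp
      rw [hstep, ih]
      have hdate : pvA_date (pvA_get t "content" "") = pvB_date (pvB_get t "content" "") :=
        pv_date_eq _
      rw [hdate]
      by_cases hc : cur = []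
      · subst hc; simp [pvGl, hm, pvFlush]
      · simp [pvGl, hm, hc, pvFlush]
    · have hm' : pvB_isMarker t = false := by simpa using hm
      have hstep : pvA_step (ts, ds, cur, d) t
          = (ts, ds, cur ++ [pvA_line (pvA_get t "role" "user") (pvA_get t "content" "")], d) := by
        simp only [pvA_step, hmarker, hm']; simp
      rw [hstep, ih]
      have hline : pvA_line (pvA_get t "role" "user") (pvA_get t "content" "") = pvB_line t := rfl
      rw [hline]
      simp [pvGl, hm']

lemma pvGl_append_nomark (pre ys : List (List (String × String))) :
    ∀ (cur : List String) (d : String), (∀ t ∈ pre, pvB_isMarker t = false) →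
      pvGl (pre ++ ys) cur d = pvGl ys (cur ++ pre.map pvB_line) d := by
  induction pre with
  | nil => intro cur d _; simp
  | cons t pre ih =>
    intro cur d h
    have ht : pvB_isMarker t = false := h t (List.mem_cons_self)
    have hrest : ∀ u ∈ pre, pvB_isMarker u = false := fun u hu => h u (List.mem_cons_of_mem t hu)
    simp only [List.cons_append, pvGl, ht, Bool.false_eq_true, if_false]
    rw [ih _ _ hrest]
    simp

lemma pvB_loop_eq_aux (n : Nat) :
    ∀ (rest : List (List (String × String))), rest.length ≤ n → ∀ (d : String),
      pvB_loop rest d = pvGl rest [] d := by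
  induction n with
  | zero =>
    intro rest hn d
    have hr : rest = [] := List.eq_nil_of_length_eq_zero (Nat.le_zero.mp hn)
    subst hr
    rw [pvB_loop.eq_def]
    simp [pvGl]
  | succ n ih =>
    intro rest hn d
    rw [pvB_loop.eq_def]
    split
    next h =>
      have hall : ∀ t ∈ rest, pvB_isMarker t = false := List.findIdx?_eq_none_iff.mp h
      have hg := pvGl_append_nomark rest [] [] d hall
      rw [List.append_nil] at hg
      rw [hg]
      by_cases hr : rest = []
      · subst hr; simp [pvGl]
      · simp [pvGl, hr]
    next k h =>
      obtain ⟨hk, hpk, hlt⟩ := List.findIdx?_eq_some_iff_getElem.mp h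
      have htake : ∀ t ∈ rest.take k, pvB_isMarker t = false := by
        intro t ht
        obtain ⟨j, hj, rfl⟩ := List.mem_iff_getElem.mp ht
        have hjk : j < k := by
          have := hj; simp [List.length_take] at this; omega
        rw [List.getElem_take]
        simpa using hlt j hjk
      have hgl : pvGl rest [] d
          = (if (rest.take k).map pvB_line ≠ [] then
              (PySem.Str.join "\n" ((rest.take k).map pvB_line)
                :: (pvGl (rest.drop (k + 1)) []
                    (pvB_date (pvB_get (rest[k]'hk) "content" ""))).1,
               d :: (pvGl (rest.drop (k + 1)) []
                    (pvB_date (pvB_get (rest[k]'hk) "content" ""))).2)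
            else pvGl (rest.drop (k + 1)) []
                (pvB_date (pvB_get (rest[k]'hk) "content" ""))) := by
        conv_lhs => rw [← List.take_append_drop k rest, List.drop_eq_getElem_cons hk]
        rw [pvGl_append_nomark _ _ _ _ htake]
        simp [pvGl, hpk]
      rw [ih (rest.drop (k + 1)) (by simp only [List.length_drop]; omega), hgl]
      have hgd : rest.getD k [] = rest[k]'hk := List.getD_eq_getElem rest [] hk
      rw [hgd]
      simp only [ne_eq, List.map_eq_nil_iff]

lemma pvB_loop_eq (rest : List (List (String × String))) (d : String) :
    pvB_loop rest d = pvGl rest [] d :=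
  pvB_loop_eq_aux rest.length rest le_rfl d

lemma pv_slice_map {α β : Type} (f : α → β) (xs : List α) (a? b? : Option Int) :
    PySem.List.slice (xs.map f) a? b? = (PySem.List.slice xs a? b?).map f := by
  unfold PySem.List.slice
  cases a? <;> cases b? <;>
    simp [List.length_map, List.map_take, List.map_drop]

-- ===== VERDICT (by name: the statement is the Claim_ definition above) =====
theorem split_into_sessions_py_spec : Claim_equal_split_into_sessions_py := by
  intro hist _
  show split_into_sessions_py hist = split_into_sessions_py_alt hist
  unfold split_into_sessions_py split_into_sessions_py_alt
  have h1 : pvFlush (hist.foldl pvA_step ([], [], [], "")) = pvB_loop hist "" := by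
    rw [pvB_loop_eq, pv_fold_eq]
    simp
  rw [h1]
  have hline : (fun t => pvA_line (pvA_get t "role" "user") (pvA_get t "content" ""))
      = pvB_line := rfl
  simp only [hline, List.length_map, pv_slice_map]
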